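-- pv_equiv track=rewrite | github.com/FB-18-19-PreAP-CS/wordplay-Christian-Cormier | textreader.py | uses_only
-- ===== SOURCE A (Python) =====
-- def uses_only(word,letters):
--     '''
--     >>> uses_only('gain','al')
--     False
--
--     >>> uses_only('cod','doc')
--     True
--
--     >>> uses_only('bibliography','iblography')
--     True
--     '''
--     f = 0
--     for i in range(0,len(letters)):
--         if letters[i] in word:
--             f += 1
--         else:
--             pass
--     if f == len(letters):
--         return True
--     else:
--         return False
-- ===== SOURCE B (Python) =====
-- def uses_only(word, letters):
--     return set(letters) <= set(word)
-- ===== Notes on version B (the rewrite author's own statement) =====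
-- stated objective: idiomatic
-- what changed: Replaces the explicit index loop with a hit counter and final length comparison by a single set subset test set(letters) <= set(word).
import Mathlib
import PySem

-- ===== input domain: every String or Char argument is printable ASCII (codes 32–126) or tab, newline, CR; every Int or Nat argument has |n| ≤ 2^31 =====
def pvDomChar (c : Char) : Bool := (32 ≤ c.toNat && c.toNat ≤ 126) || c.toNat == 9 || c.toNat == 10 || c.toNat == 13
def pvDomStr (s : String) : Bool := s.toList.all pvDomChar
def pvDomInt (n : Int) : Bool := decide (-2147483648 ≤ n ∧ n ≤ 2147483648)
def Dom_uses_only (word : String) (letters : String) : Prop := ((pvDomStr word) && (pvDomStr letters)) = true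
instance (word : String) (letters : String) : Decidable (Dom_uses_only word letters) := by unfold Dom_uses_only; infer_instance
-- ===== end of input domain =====

-- ===== PORT A =====
-- literal port of A: count, over range(0, len(letters)), the indices whose character
-- occurs in word (Python's one-char-substring 'in'), then compare the counter with len(letters)
def usesOnlyStep (word : String) (letters : String) (f : Int) (i : Int) : Int :=
  match PySem.Str.pyGet? letters i with
  | some c => if PySem.Chars.isIn [c] word.toList then f + 1 else f  -- 'letters[i] in word'
  | none => f  -- unreachable: i is always in range

def uses_only (word : String) (letters : String) : Bool :=
  let f : Int :=
    (PySem.List.pyRange 0 (PySem.Str.len letters) 1).foldl (usesOnlyStep word letters) 0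
  f == PySem.Str.len letters

-- ===== PORT B =====
-- B: set(letters) <= set(word), a single subset test
def uses_only_alt (word : String) (letters : String) : Bool :=
  PySem.Set.issubset (PySem.Set.ofList letters.toList) (PySem.Set.ofList word.toList)

-- ===== PRECONDITION & SPEC =====
def Spec_uses_only (word : String) (letters : String) (out : Bool) : Prop := out = uses_only_alt word letters
instance (word : String) (letters : String) (out : Bool) : Decidable (Spec_uses_only word letters out) := by unfold Spec_uses_only; infer_instance

-- ===== CLAIM =====
def Claim_equal_uses_only : Prop := ∀ (word : String) (letters : String), Dom_uses_only word letters → Spec_uses_only word letters (uses_only word letters)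

-- ===== LEMMAS AND PROOFS =====

-- Python's one-char-substring test 'c in word' is element membership
theorem isIn_singleton (c : Char) (l : List Char) :
    PySem.Chars.isIn [c] l = l.contains c := by
  rw [Bool.eq_iff_iff, PySem.Chars.isIn_iff_infix, List.contains_iff_mem]
  constructor
  · intro hinf; exact hinf.sublist.subset (List.mem_singleton_self c)
  · intro h; obtain ⟨s, t, rfl⟩ := List.append_of_mem h; exact ⟨s, t, by simp⟩

-- A's counter loop counts exactly the letters occurring in word; f == len(letters) is 'all'
theorem uses_only_eq_all (word letters : String) :
    uses_only word letters = letters.toList.all (fun c => word.toList.contains c) := by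
  simp only [uses_only, PySem.Str.len_eq]
  have hcongr :
      List.foldl (usesOnlyStep word letters)
        0 (PySem.List.pyRange 0 (letters.toList.length : Int) 1)
      = List.foldl
        (fun f i =>
          if word.toList.contains (PySem.List.pyGetD letters.toList i 'a') then f + 1 else f)
        0 (PySem.List.pyRange 0 (letters.toList.length : Int) 1) := by
    apply PySem.List.foldl_congr_mem
    intro acc i hi
    have hmem := PySem.List.mem_pyRange_one.mp hi
    obtain ⟨k, rfl⟩ := Int.eq_ofNat_of_zero_le hmem.1
    have hk : k < letters.toList.length := by exact_mod_cast hmem.2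
    have hget : PySem.Str.pyGet? letters (k : Int) = some (PySem.List.pyGetD letters.toList (k : Int) 'a') := by
      rw [PySem.Str.pyGet?_natCast, PySem.List.pyGetD_natCast]
      simp [List.getElem?_eq_getElem hk]
    simp only [usesOnlyStep, hget, isIn_singleton]
  rw [hcongr]
  rw [PySem.List.foldl_pyRange_zero_pyGetD' letters.toList 'a'
        (fun f c => if word.toList.contains c then f + 1 else f) 0]
  rw [PySem.List.foldl_if_add_one]
  rw [Bool.eq_iff_iff]
  simp only [Int.zero_add, beq_iff_eq, Int.natCast_inj, List.all_eq_true,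
    List.countP_eq_length]

-- B is the subset relation
theorem uses_only_alt_iff (word letters : String) :
    uses_only_alt word letters = true ↔ ∀ c ∈ letters.toList, c ∈ word.toList := by
  unfold uses_only_alt
  rw [PySem.Set.issubset_iff]
  constructor
  · intro h c hc
    exact (PySem.Set.mem_ofList word.toList c).mp (h c ((PySem.Set.mem_ofList letters.toList c).mpr hc))
  · intro h c hc
    exact (PySem.Set.mem_ofList word.toList c).mpr (h c ((PySem.Set.mem_ofList letters.toList c).mp hc))

-- ===== VERDICT =====
theorem uses_only_spec : Claim_equal_uses_only := by
  intro word letters _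
  unfold Spec_uses_only
  rw [Bool.eq_iff_iff, uses_only_eq_all, uses_only_alt_iff, List.all_eq_true]
  simp
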